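-- pv_equiv track=rewrite | github.com/oschusler/PycQED_py3 | pycqed/instrument_drivers/physical_instruments/ZurichInstruments/ZI_HDAWG8.py | _is_dio_strb_symmetric
-- ===== SOURCE A (Python) =====
-- def _is_dio_strb_symmetric(data, bits):
--     # FIXME: reports OK if there is no input
--     count_ok = True
--
--     for bit in bits:
--         strobe_mask = 1 << bit
--         count_low = False
--         count_high = False
--         strobe_low = 0
--         strobe_high = 0
--         last_strobe = None
--         for n, d in enumerate(data):
--             curr_strobe = (d & strobe_mask) != 0
--
--             if count_high:
--                 if curr_strobe:
--                     strobe_high += 1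
--                 else:
--                     if (strobe_low > 0) and (strobe_low != strobe_high):
--                         count_ok = False
--                         break
--
--             if count_low:
--                 if not curr_strobe:
--                     strobe_low += 1
--                 else:
--                     if (strobe_high > 0) and (strobe_low != strobe_high):
--                         count_ok = False
--                         break
--
--             if (last_strobe != None):
--                 if (curr_strobe and not last_strobe):
--                     strobe_high = 0
--                     count_high = True
--                     count_low = False
--                 elif (not curr_strobe and last_strobe):
--                     strobe_low = 0
--                     count_low = True
--                     count_high = False
--
--             last_strobe = curr_strobe
--
--         if not count_ok:
--             break
--
--     return count_ok
-- ===== SOURCE B (Python) =====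
-- def _is_dio_strb_symmetric(data, bits):
--     for bit in bits:
--         mask = 1 << bit
--         vals = [(d & mask) != 0 for d in data]
--         # run-length encode: maximal runs as [value, length]
--         runs = []
--         for v in vals:
--             if runs and runs[-1][0] == v:
--                 runs[-1][1] += 1
--             else:
--                 runs.append([v, 1])
--         # the runs before the first and after the last transition are never compared
--         mid = [length - 1 for _, length in runs[1:-1]]
--         for prev, cur in zip(mid, mid[1:]):
--             if prev > 0 and cur != prev:
--                 return False
--     return True
-- ===== Notes on version B (the rewrite author's own statement) =====
-- stated objective: alternative
-- what changed: Replaces A's five-variable per-sample strobe state machine by a run-length encoding of each bit's strobe stream followed by a single adjacent-pair comparison of the interior run lengths (first and last runs skipped, a pair skipped when the previous run has length 1, matching the checks A performs).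
import Mathlib
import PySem

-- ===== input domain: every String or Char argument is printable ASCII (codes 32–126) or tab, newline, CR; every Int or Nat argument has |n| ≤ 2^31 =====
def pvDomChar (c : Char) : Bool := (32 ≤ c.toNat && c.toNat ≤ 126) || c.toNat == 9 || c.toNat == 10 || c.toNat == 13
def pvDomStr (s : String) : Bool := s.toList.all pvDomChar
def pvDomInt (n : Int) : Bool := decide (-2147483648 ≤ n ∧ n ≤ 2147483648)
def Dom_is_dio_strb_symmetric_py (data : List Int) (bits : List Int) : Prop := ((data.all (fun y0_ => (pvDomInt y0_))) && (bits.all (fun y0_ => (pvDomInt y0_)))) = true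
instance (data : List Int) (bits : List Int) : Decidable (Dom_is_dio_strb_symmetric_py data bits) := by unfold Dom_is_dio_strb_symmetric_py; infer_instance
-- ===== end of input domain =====

-- B replaces A's five-variable strobe state machine by a run-length encoding of each bit's
-- strobe stream followed by a comparison of adjacent interior run lengths (alternative
-- decomposition, same cost).  A mutates nothing; equivalence is about the return value.

-- ===== PORT A =====
-- inner 'for n, d in enumerate(data)' loop; state (count_low, count_high, strobe_low,
-- strobe_high, last_strobe); returning false = 'count_ok = False; break'
def pvAInner (mask : Int) : List Int → Bool → Bool → Int → Int → Option Bool → Bool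
  | [], _, _, _, _, _ => true
  | d :: rest, cl, ch, sl, sh, last =>
    let curr : Bool := decide (PySem.Int.band d mask ≠ 0)
    if ch ∧ ¬curr ∧ 0 < sl ∧ sl ≠ sh then false
    else
      let sh2 := if ch ∧ curr then sh + 1 else sh
      if cl ∧ curr ∧ 0 < sh2 ∧ sl ≠ sh2 then false
      else
        let sl2 := if cl ∧ ¬curr then sl + 1 else sl
        match last with
        | none => pvAInner mask rest cl ch sl2 sh2 (some curr)
        | some l =>
          if curr ∧ ¬l then pvAInner mask rest false true sl2 0 (some curr)
          else if ¬curr ∧ l then pvAInner mask rest true false 0 sh2 (some curr)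
          else pvAInner mask rest cl ch sl2 sh2 (some curr)

-- outer 'for bit in bits' loop with 'if not count_ok: break'
def pvAOuter (data : List Int) : List Int → Bool
  | [] => true
  | bit :: rest =>
    if pvAInner ((1 : Int) <<< bit.toNat) data false false 0 0 none then pvAOuter data rest
    else false

def is_dio_strb_symmetric_py (data : List Int) (bits : List Int) : Bool :=
  pvAOuter data bits

-- ===== PORT B =====
-- 'for v in vals' building runs; acc holds the runs in reverse (head = runs[-1])
def pvRunsAux : List (Bool × Int) → List Bool → List (Bool × Int)
  | acc, [] => acc.reverse
  | (w, k) :: t, v :: rest =>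
    if w == v then pvRunsAux ((w, k + 1) :: t) rest
    else pvRunsAux ((v, 1) :: (w, k) :: t) rest
  | [], v :: rest => pvRunsAux [(v, 1)] rest

-- 'for prev, cur in zip(mid, mid[1:]): if prev > 0 and cur != prev: return False'
def pvBCheck : List (Int × Int) → Bool
  | [] => true
  | (p, c) :: rest => if 0 < p ∧ c ≠ p then false else pvBCheck rest

-- body of the 'for bit in bits' loop of B
def pvBBit (data : List Int) (bit : Int) : Bool :=
  let mask := (1 : Int) <<< bit.toNat
  let vals := data.map (fun d => decide (PySem.Int.band d mask ≠ 0))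
  let runs := pvRunsAux [] vals
  let mid := ((runs.drop 1).dropLast).map (fun r => r.2 - 1)  -- runs[1:-1]
  pvBCheck (mid.zip (mid.drop 1))

def is_dio_strb_symmetric_py_alt (data : List Int) (bits : List Int) : Bool :=
  bits.all (pvBBit data)

-- ===== PRECONDITION & SPEC =====
-- Pre_ excludes exactly the inputs with a negative bit position, on which Python's
-- '1 << bit' raises ValueError in A (and in B alike).
def Pre_is_dio_strb_symmetric_py (data : List Int) (bits : List Int) : Prop :=
  ∀ b ∈ bits, 0 ≤ b
instance (data : List Int) (bits : List Int) : Decidable (Pre_is_dio_strb_symmetric_py data bits) := by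
  unfold Pre_is_dio_strb_symmetric_py; infer_instance

def pvWitness_is_dio_strb_symmetric_py : List Int × List Int := ([1, 0, 1, 0, 1], [0, 1])

def Spec_is_dio_strb_symmetric_py (data : List Int) (bits : List Int) (out : Bool) : Prop :=
  out = is_dio_strb_symmetric_py_alt data bits
instance (data : List Int) (bits : List Int) (out : Bool) : Decidable (Spec_is_dio_strb_symmetric_py data bits out) := by
  unfold Spec_is_dio_strb_symmetric_py; infer_instance

-- ===== CLAIM (what is proved, stated in full; the proofs are below) =====
def Claim_equal_is_dio_strb_symmetric_py : Prop := ∀ (data : List Int) (bits : List Int), Dom_is_dio_strb_symmetric_py data bits → Pre_is_dio_strb_symmetric_py data bits → Spec_is_dio_strb_symmetric_py data bits (is_dio_strb_symmetric_py data bits)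

-- ===== LEMMAS AND PROOFS =====

-- A's inner machine over the precomputed strobe booleans
def pvMach : List Bool → Bool → Bool → Int → Int → Option Bool → Bool
  | [], _, _, _, _, _ => true
  | curr :: rest, cl, ch, sl, sh, last =>
    if ch ∧ ¬curr ∧ 0 < sl ∧ sl ≠ sh then false
    else
      let sh2 := if ch ∧ curr then sh + 1 else sh
      if cl ∧ curr ∧ 0 < sh2 ∧ sl ≠ sh2 then false
      else
        let sl2 := if cl ∧ ¬curr then sl + 1 else sl
        match last with
        | none => pvMach rest cl ch sl2 sh2 (some curr)
        | some l =>
          if curr ∧ ¬l then pvMach rest false true sl2 0 (some curr)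
          else if ¬curr ∧ l then pvMach rest true false 0 sh2 (some curr)
          else pvMach rest cl ch sl2 sh2 (some curr)

-- the machine in 'counting' state: current run value v, its count c, stored opposite count o
def pvMachCS (bs : List Bool) (v : Bool) (c o : Int) : Bool :=
  if v then pvMach bs false true o c (some true) else pvMach bs true false c o (some false)

-- merge a run (w, k) onto the front of a run list
def pvConsK (w : Bool) (k : Int) : List (Bool × Int) → List (Bool × Int)
  | (w', j) :: R' => if w' == w then (w', j + k) :: R' else (w, k) :: (w', j) :: R'
  | [] => [(w, k)]

-- front-recursion run-length encoding
def pvRle : List Bool → List (Bool × Int)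
  | [] => []
  | v :: bs => pvConsK v 1 (pvRle bs)

def pvExpand : List (Bool × Int) → List Bool
  | [] => []
  | (v, k) :: R => List.replicate k.toNat v ++ pvExpand R

-- adjacent runs carry different values
def pvAlt : List (Bool × Int) → Prop
  | [] => True
  | [_] => True
  | p :: q :: R => p.1 ≠ q.1 ∧ pvAlt (q :: R)

-- A's sequence of end-of-run checks: o = previous opposite count, c = current count
def pvCheckRuns : Int → Int → List Int → Bool
  | _, _, [] => true
  | o, c, k :: ks => if 0 < o ∧ o ≠ c then false else pvCheckRuns c (k - 1) ks

def pvPairs (cs : List Int) : List (Int × Int) := cs.zip (cs.drop 1)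

theorem pvAInner_eq_mach (mask : Int) : ∀ (ds : List Int) (cl ch : Bool) (sl sh : Int) (last : Option Bool),
    pvAInner mask ds cl ch sl sh last =
      pvMach (ds.map (fun d => decide (PySem.Int.band d mask ≠ 0))) cl ch sl sh last := by
  intro ds
  induction ds with
  | nil => intro _ _ _ _ _; rfl
  | cons d rest ih =>
    intro cl ch sl sh last
    cases last <;> (simp only [pvAInner, pvMach, List.map]; split_ifs <;> simp [ih])

theorem pvMachCS_nil (v : Bool) (c o : Int) : pvMachCS [] v c o = true := by
  cases v <;> rfl

theorem pvMachCS_same (v : Bool) (bs : List Bool) (c o : Int) :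
    pvMachCS (v :: bs) v c o = pvMachCS bs v (c + 1) o := by
  cases v <;> simp [pvMachCS, pvMach]

theorem pvMachCS_switch (v : Bool) (bs : List Bool) (c o : Int) :
    pvMachCS ((!v) :: bs) v c o = if 0 < o ∧ o ≠ c then false else pvMachCS bs (!v) 0 c := by
  cases v <;> simp [pvMachCS, pvMach, eq_comm]

theorem pvMachCS_replicate (v : Bool) (n : Nat) : ∀ (bs : List Bool) (c o : Int),
    pvMachCS (List.replicate n v ++ bs) v c o = pvMachCS bs v (c + n) o := by
  induction n with
  | zero => intro bs c o; simp
  | succ m ih =>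
    intro bs c o
    rw [List.replicate_succ, List.cons_append, pvMachCS_same, ih]
    congr 1
    push_cast; ring

theorem pvMach_ps_same (l : Bool) (bs : List Bool) :
    pvMach (l :: bs) false false 0 0 (some l) = pvMach bs false false 0 0 (some l) := by
  cases l <;> simp [pvMach]

theorem pvMach_ps_replicate (l : Bool) (n : Nat) : ∀ (bs : List Bool),
    pvMach (List.replicate n l ++ bs) false false 0 0 (some l) =
      pvMach bs false false 0 0 (some l) := by
  induction n with
  | zero => intro bs; simp
  | succ m ih => intro bs; rw [List.replicate_succ, List.cons_append, pvMach_ps_same, ih]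

theorem pvMach_ps_switch (l : Bool) (bs : List Bool) :
    pvMach ((!l) :: bs) false false 0 0 (some l) = pvMachCS bs (!l) 0 0 := by
  cases l <;> simp [pvMach, pvMachCS]

theorem pvMach_init (b : Bool) (bs : List Bool) :
    pvMach (b :: bs) false false 0 0 none = pvMach bs false false 0 0 (some b) := by
  cases b <;> simp [pvMach]

theorem pvMachCS_expand : ∀ (R : List (Bool × Int)) (v : Bool) (c o : Int),
    pvAlt R → (∀ r ∈ R, 1 ≤ r.2) → (∀ h : R ≠ [], (R.head h).1 = !v) →
    pvMachCS (pvExpand R) v c o = pvCheckRuns o c (R.map (·.2)) := by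
  intro R
  induction R with
  | nil => intro v c o _ _ _; simp [pvExpand, pvCheckRuns, pvMachCS_nil]
  | cons r R' ih =>
    intro v c o hch hlen hhd
    obtain ⟨w, k⟩ := r
    have hw : w = !v := hhd (by simp)
    subst hw
    have hk : 1 ≤ k := hlen _ List.mem_cons_self
    have hkn : k.toNat = (k.toNat - 1) + 1 := by omega
    have hch' : pvAlt R' := by
      cases R' with
      | nil => trivial
      | cons q R'' => exact hch.2
    simp only [pvExpand, pvCheckRuns, List.map]
    rw [hkn, List.replicate_succ, List.cons_append, pvMachCS_switch]
    by_cases hbad : 0 < o ∧ o ≠ c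
    · simp [hbad]
    · rw [if_neg hbad, if_neg hbad, pvMachCS_replicate]
      have harg : ((0 : Int) + ((k.toNat - 1 : Nat) : Int)) = k - 1 := by omega
      rw [harg]
      refine ih (!v) (k - 1) c hch' (fun r hr => hlen r (List.mem_cons_of_mem _ hr)) ?_
      intro h
      cases R' with
      | nil => exact absurd rfl h
      | cons q R'' =>
        obtain ⟨w2, k2⟩ := q
        have hne : ¬((!v) = w2) := hch.1
        simp only [List.head_cons]
        revert hne; cases v <;> cases w2 <;> decide

theorem pvMach_ps_expand (R : List (Bool × Int)) (l : Bool)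
    (hch : pvAlt R) (hlen : ∀ r ∈ R, 1 ≤ r.2) (hhd : ∀ h : R ≠ [], (R.head h).1 = !l) :
    pvMach (pvExpand R) false false 0 0 (some l) = pvCheckRuns 0 0 (R.map (·.2)) := by
  rcases R with _ | ⟨⟨w, k⟩, R'⟩
  · simp [pvExpand, pvCheckRuns, pvMach]
  · have hw : w = !l := hhd (by simp)
    subst hw
    have hk : 1 ≤ k := hlen _ List.mem_cons_self
    have hkn : k.toNat = (k.toNat - 1) + 1 := by omega
    have hch' : pvAlt R' := by
      cases R' with
      | nil => trivial
      | cons q R'' => exact hch.2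
    simp only [pvExpand, List.map, pvCheckRuns]
    rw [hkn, List.replicate_succ, List.cons_append, pvMach_ps_switch, pvMachCS_replicate]
    have h0 : ¬((0 : Int) < 0 ∧ (0 : Int) ≠ 0) := by simp
    rw [if_neg h0]
    have harg : ((0 : Int) + ((k.toNat - 1 : Nat) : Int)) = k - 1 := by omega
    rw [harg]
    refine pvMachCS_expand R' (!l) (k - 1) 0 hch' (fun r hr => hlen r (List.mem_cons_of_mem _ hr)) ?_
    intro h
    cases R' with
    | nil => exact absurd rfl h
    | cons q R'' =>
      obtain ⟨w2, k2⟩ := q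
      have hne : ¬((!l) = w2) := hch.1
      simp only [List.head_cons]
      revert hne; cases l <;> cases w2 <;> decide

-- pvRle is correct: it expands back, alternates, and has positive lengths
theorem pvRle_spec : ∀ (bs : List Bool),
    pvExpand (pvRle bs) = bs ∧ pvAlt (pvRle bs) ∧ (∀ r ∈ pvRle bs, 1 ≤ r.2) := by
  intro bs
  induction bs with
  | nil => simp [pvRle, pvExpand, pvAlt]
  | cons v bs' ih =>
    obtain ⟨hexp, hch, hlen⟩ := ih
    rcases hR : pvRle bs' with _ | ⟨⟨w, k⟩, R'⟩
    · have hbs' : bs' = [] := by rw [hR] at hexp; simpa [pvExpand] using hexp.symm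
      subst hbs'
      refine ⟨?_, ?_, ?_⟩ <;> simp [pvRle, pvConsK, pvExpand, pvAlt]
    · rw [hR] at hexp hch hlen
      have hk : 1 ≤ k := hlen _ List.mem_cons_self
      by_cases hwv : w = v
      · subst hwv
        have hRv : pvRle (w :: bs') = (w, k + 1) :: R' := by
          simp [pvRle, hR, pvConsK]
        rw [hRv]
        refine ⟨?_, ?_, ?_⟩
        · simp only [pvExpand]
          have h1 : (k + 1).toNat = k.toNat + 1 := by omega
          rw [h1, List.replicate_succ, List.cons_append]
          simp only [pvExpand] at hexp
          rw [hexp]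
        · cases R' with
          | nil => trivial
          | cons q R'' => exact ⟨hch.1, hch.2⟩
        · intro r hr
          rcases List.mem_cons.mp hr with h | h
          · subst h; simp; omega
          · exact hlen r (by simp [h])
      · have hRv : pvRle (v :: bs') = (v, 1) :: (w, k) :: R' := by
          simp [pvRle, hR, pvConsK, hwv]
        rw [hRv]
        refine ⟨?_, ?_, ?_⟩
        · simp only [pvExpand] at hexp ⊢
          simp [hexp]
        · exact ⟨by simpa using Ne.symm hwv, hch⟩
        · intro r hr
          rcases List.mem_cons.mp hr with h | h
          · subst h; simp
          · exact hlen r h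

theorem pvConsK_one_shape (v : Bool) (X : List (Bool × Int)) :
    ∃ j X', pvConsK v 1 X = (v, j) :: X' := by
  rcases X with _ | ⟨⟨w', jj⟩, X'⟩
  · exact ⟨1, [], rfl⟩
  · by_cases h : w' = v
    · exact ⟨jj + 1, X', by simp [pvConsK, h]⟩
    · exact ⟨1, (w', jj) :: X', by simp [pvConsK, h]⟩

-- B's runs loop computes pvRle (acc = reversed runs built so far)
theorem pvRunsAux_consK : ∀ (bs : List Bool) (w : Bool) (k : Int) (t : List (Bool × Int)),
    pvRunsAux ((w, k) :: t) bs = t.reverse ++ pvConsK w k (pvRle bs) := by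
  intro bs
  induction bs with
  | nil => intro w k t; simp [pvRunsAux, pvRle, pvConsK]
  | cons v bs' ih =>
    intro w k t
    by_cases hwv : w = v
    · subst hwv
      simp only [pvRunsAux, beq_self_eq_true, if_true]
      rw [ih]
      congr 1
      rcases hR : pvRle bs' with _ | ⟨⟨w', j⟩, R'⟩
      · simp [pvRle, hR, pvConsK]
        omega
      · by_cases hw' : w' = w
        · simp [pvRle, hR, pvConsK, hw']
          omega
        · simp [pvRle, hR, pvConsK, hw']
          omega
    · have hb : (w == v) = false := by simp [hwv]
      simp only [pvRunsAux, hb, Bool.false_eq_true, if_false]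
      obtain ⟨j, X', hX⟩ := pvConsK_one_shape v (pvRle bs')
      have hvw : ¬(v = w) := fun h => hwv h.symm
      simp only [pvRle]
      rw [ih, hX]
      simp [pvConsK, hvw]

theorem pvRunsAux_rle (bs : List Bool) : pvRunsAux [] bs = pvRle bs := by
  cases bs with
  | nil => rfl
  | cons v bs' =>
    show pvRunsAux [(v, 1)] bs' = pvRle (v :: bs')
    rw [pvRunsAux_consK]
    simp [pvRle]

-- B's adjacent-pair pass equals A's chain of end-of-run checks
theorem pvBCheck_pairs_cons : ∀ (ks : List Int) (c : Int),
    pvBCheck (pvPairs (c :: (ks.dropLast.map (fun k => k - 1)))) = pvCheckRuns 0 c ks := by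
  intro ks
  induction ks with
  | nil => intro c; simp [pvPairs, pvBCheck, pvCheckRuns]
  | cons k ks' ih =>
    intro c
    cases ks' with
    | nil => simp [pvPairs, pvBCheck, pvCheckRuns]
    | cons k2 ks'' =>
      have h1 : ((k :: k2 :: ks'').dropLast.map (fun k => k - 1)) =
          (k - 1) :: ((k2 :: ks'').dropLast.map (fun k => k - 1)) := by
        simp [List.dropLast]
      rw [h1]
      have h2 : pvPairs (c :: (k - 1) :: ((k2 :: ks'').dropLast.map (fun k => k - 1))) =
          (c, k - 1) :: pvPairs ((k - 1) :: ((k2 :: ks'').dropLast.map (fun k => k - 1))) := rfl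
      rw [h2]
      simp only [pvBCheck]
      rw [ih (k - 1)]
      simp only [pvCheckRuns]
      split_ifs <;> first | rfl | omega

theorem pvBCheck_top : ∀ (ks : List Int),
    pvBCheck (pvPairs (ks.dropLast.map (fun k => k - 1))) = pvCheckRuns 0 0 ks := by
  intro ks
  cases ks with
  | nil => simp [pvPairs, pvBCheck, pvCheckRuns]
  | cons k ks' =>
    cases ks' with
    | nil => simp [pvPairs, pvBCheck, pvCheckRuns]
    | cons k2 ks'' =>
      have h1 : ((k :: k2 :: ks'').dropLast.map (fun k => k - 1)) =
          (k - 1) :: ((k2 :: ks'').dropLast.map (fun k => k - 1)) := by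
        simp [List.dropLast]
      rw [h1, pvBCheck_pairs_cons]
      simp [pvCheckRuns]

-- A per bit, expressed through the runs of the strobe stream
theorem pvMach_top (bs : List Bool) :
    pvMach bs false false 0 0 none = pvCheckRuns 0 0 (((pvRle bs).drop 1).map (·.2)) := by
  obtain ⟨hexp, hch, hlen⟩ := pvRle_spec bs
  rcases hR : pvRle bs with _ | ⟨⟨v0, k0⟩, R⟩
  · have hbs : bs = [] := by rw [hR] at hexp; simpa [pvExpand] using hexp.symm
    subst hbs
    simp [pvMach, pvCheckRuns]
  · rw [hR] at hexp hch hlen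
    have hk0 : 1 ≤ k0 := hlen _ List.mem_cons_self
    have hkn : k0.toNat = (k0.toNat - 1) + 1 := by omega
    simp only [pvExpand] at hexp
    rw [← hexp, hkn, List.replicate_succ, List.cons_append, pvMach_init, pvMach_ps_replicate]
    have hch' : pvAlt R := by
      cases R with
      | nil => trivial
      | cons q R'' => exact hch.2
    rw [pvMach_ps_expand R v0 hch' (fun r hr => hlen r (List.mem_cons_of_mem _ hr)) ?_]
    · simp
    · intro h
      cases R with
      | nil => exact absurd rfl h
      | cons q R'' =>
        obtain ⟨w2, k2⟩ := q
        have hne : ¬(v0 = w2) := hch.1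
        simp only [List.head_cons]
        revert hne; cases v0 <;> cases w2 <;> decide

theorem pvBit_eq (data : List Int) (bit : Int) :
    pvAInner ((1 : Int) <<< bit.toNat) data false false 0 0 none = pvBBit data bit := by
  simp only [pvBBit]
  rw [pvAInner_eq_mach, pvMach_top, pvRunsAux_rle]
  set R1 := (pvRle (data.map (fun d => decide (PySem.Int.band d ((1 : Int) <<< bit.toNat) ≠ 0)))).drop 1 with hR1
  have hmid : (R1.dropLast.map (fun r : Bool × Int => r.2 - 1)) =
      ((R1.map (·.2)).dropLast.map (fun k => k - 1)) := by
    simp only [List.map_dropLast, List.map_map]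
    rfl
  rw [hmid]
  exact (pvBCheck_top (R1.map (·.2))).symm

theorem pvOuter_eq (data : List Int) : ∀ (bits : List Int),
    pvAOuter data bits = bits.all (pvBBit data) := by
  intro bits
  induction bits with
  | nil => rfl
  | cons b rest ih =>
    simp only [pvAOuter, List.all_cons]
    rw [pvBit_eq data b]
    cases h : pvBBit data b <;> simp [ih]

-- ===== VERDICT (by name: the statement is the Claim_ definition above) =====
theorem is_dio_strb_symmetric_py_spec : Claim_equal_is_dio_strb_symmetric_py := by
  intro data bits _ _
  unfold Spec_is_dio_strb_symmetric_py is_dio_strb_symmetric_py is_dio_strb_symmetric_py_alt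
  exact pvOuter_eq data bits
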